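-- pv_equiv track=rewrite | github.com/FeanorKingofNoldor/prometheus_v2 | prometheus/data_ingestion/factors_sector.py | _normalise_sector_name
-- ===== SOURCE A (Python) =====
-- from typing import Dict, List, Tuple
--
-- def _normalise_sector_name(sector: str) -> str:
--     """Normalise a sector label into a compact identifier.
--
--     The output is uppercased, non-alphanumeric characters are replaced by
--     underscores, and consecutive underscores are collapsed. The result is
--     truncated to 32 characters to keep `factor_id` within the 64-char
--     limit alongside the prefix.
--     """
--
--     if not sector:
--         return "UNKNOWN"
--     s = sector.upper()
--     cleaned_chars: List[str] = []
--     prev_us = False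
--     for ch in s:
--         if ch.isalnum():
--             cleaned_chars.append(ch)
--             prev_us = False
--         else:
--             if not prev_us:
--                 cleaned_chars.append("_")
--                 prev_us = True
--     cleaned = "".join(cleaned_chars).strip("_")
--     if not cleaned:
--         cleaned = "UNKNOWN"
--     return cleaned[:32]
-- ===== SOURCE B (Python) =====
-- def _normalise_sector_name(sector: str) -> str:
--     """Normalise a sector label into a compact identifier.
--
--     Same task as A, but by scanning maximal runs of same-category
--     characters (two-pointer span grouping) instead of a per-character
--     previous-underscore flag.
--     """
--     if not sector:
--         return "UNKNOWN"
--     s = sector.upper()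
--     pieces = []
--     i = 0
--     n = len(s)
--     while i < n:
--         k = s[i].isalnum()
--         j = i
--         while j < n and s[j].isalnum() == k:
--             j += 1
--         pieces.append(s[i:j] if k else "_")
--         i = j
--     cleaned = "".join(pieces).strip("_")
--     if not cleaned:
--         cleaned = "UNKNOWN"
--     return cleaned[:32]
-- ===== Notes on version B (the rewrite author's own statement) =====
-- stated objective: alternative
-- what changed: Replaces the per-character prev_us flag loop with a two-pointer scan over maximal runs of same-category characters, emitting each alphanumeric run whole and one underscore per non-alphanumeric run.
import Mathlib
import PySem

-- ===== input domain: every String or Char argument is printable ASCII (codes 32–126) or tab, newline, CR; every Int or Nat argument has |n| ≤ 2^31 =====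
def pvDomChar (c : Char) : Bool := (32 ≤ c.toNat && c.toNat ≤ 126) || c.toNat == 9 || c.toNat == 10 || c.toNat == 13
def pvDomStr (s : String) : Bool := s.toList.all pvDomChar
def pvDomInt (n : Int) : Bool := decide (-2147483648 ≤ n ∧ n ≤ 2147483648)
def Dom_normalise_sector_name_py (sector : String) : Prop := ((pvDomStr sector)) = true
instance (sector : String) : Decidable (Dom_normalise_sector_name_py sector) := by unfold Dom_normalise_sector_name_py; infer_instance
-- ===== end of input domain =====

-- B collapses non-alphanumeric runs by grouping maximal same-category runs (two-pointer span)
-- instead of A's per-character prev_us flag; alternative decomposition, same cost.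

-- ===== PORT A =====
-- the for-loop over s building cleaned_chars, state = prev_us flag
def pvALoop : List Char → Bool → List Char
  | [], _ => []
  | c :: cs, prev =>
    if PySem.Chars.isalnum c then c :: pvALoop cs false
    else if prev then pvALoop cs prev
    else '_' :: pvALoop cs true

def normalise_sector_name_py (sector : String) : String :=
  if sector = "" then "UNKNOWN"
  else
    let s := (PySem.Str.upper sector).toList
    let cleaned := PySem.Chars.stripChars (pvALoop s false) ['_']
    let cleaned := if cleaned = [] then "UNKNOWN".toList else cleaned
    String.ofList (PySem.List.slice cleaned none (some 32))

-- ===== PORT B =====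
-- the outer while loop: split into maximal runs of equal isalnum-category
-- (the inner while j loop is the span over the run)
def pvBGroups : List Char → List (Bool × List Char)
  | [] => []
  | c :: cs =>
    let k := PySem.Chars.isalnum c
    (k, c :: cs.takeWhile (fun d => PySem.Chars.isalnum d == k)) ::
      pvBGroups (cs.dropWhile (fun d => PySem.Chars.isalnum d == k))
termination_by l => l.length
decreasing_by exact Nat.lt_succ_of_le (List.length_dropWhile_le _ _)

def normalise_sector_name_py_alt (sector : String) : String :=
  if sector = "" then "UNKNOWN"
  else
    let s := (PySem.Str.upper sector).toList
    let pieces := (pvBGroups s).map (fun g => if g.1 then g.2 else ['_'])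
    let cleaned := PySem.Chars.stripChars pieces.flatten ['_']
    let cleaned := if cleaned = [] then "UNKNOWN".toList else cleaned
    String.ofList (PySem.List.slice cleaned none (some 32))

-- ===== PRECONDITION & SPEC =====
def Spec_normalise_sector_name_py (sector : String) (out : String) : Prop := out = normalise_sector_name_py_alt sector
instance (sector : String) (out : String) : Decidable (Spec_normalise_sector_name_py sector out) := by unfold Spec_normalise_sector_name_py; infer_instance

-- ===== CLAIM (what is proved, stated in full; the proofs are below) =====
def Claim_equal_normalise_sector_name_py : Prop := ∀ (sector : String), Dom_normalise_sector_name_py sector → Spec_normalise_sector_name_py sector (normalise_sector_name_py sector)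

-- ===== LEMMAS AND PROOFS =====
lemma pvALoop_alnum_run (run rest : List Char) (h : ∀ c ∈ run, PySem.Chars.isalnum c = true) :
    pvALoop (run ++ rest) false = run ++ pvALoop rest false := by
  induction run with
  | nil => rfl
  | cons c cs ih =>
    simp only [List.cons_append, pvALoop, h c (by simp)]
    rw [ih (fun d hd => h d (by simp [hd]))]
    rfl

lemma pvALoop_nonalnum_run (run rest : List Char) (h : ∀ c ∈ run, PySem.Chars.isalnum c = false) :
    pvALoop (run ++ rest) true = pvALoop rest true := by
  induction run with
  | nil => rfl
  | cons c cs ih =>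
    simp only [List.cons_append, pvALoop, h c (by simp)]
    exact ih (fun d hd => h d (by simp [hd]))

lemma pvALoop_true_eq_false (rest : List Char)
    (h : ∀ c cs, rest = c :: cs → PySem.Chars.isalnum c = true) :
    pvALoop rest true = pvALoop rest false := by
  cases rest with
  | nil => rfl
  | cons c cs => simp [pvALoop, h c cs rfl]

lemma pvDropWhile_head {α : Type} (f : α → Bool) :
    ∀ (l : List α) (d : α) (l' : List α), l.dropWhile f = d :: l' → f d = false := by
  intro l
  induction l with
  | nil => intro d l' h; simp [List.dropWhile] at h
  | cons c cs ih =>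
    intro d l' h
    by_cases hc : f c = true
    · rw [List.dropWhile_cons_of_pos hc] at h; exact ih d l' h
    · rw [List.dropWhile_cons_of_neg hc] at h
      cases h; simpa using hc

lemma pvMain : ∀ (n : Nat) (l : List Char), l.length ≤ n →
    pvALoop l false = ((pvBGroups l).map (fun g => if g.1 then g.2 else ['_'])).flatten := by
  intro n
  induction n with
  | zero =>
    intro l hl
    have : l = [] := List.eq_nil_of_length_eq_zero (Nat.le_zero.mp hl)
    subst this; simp [pvBGroups, pvALoop]
  | succ n ih =>
    intro l hl
    cases l with
    | nil => simp [pvBGroups, pvALoop]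
    | cons c cs =>
      set k := PySem.Chars.isalnum c with hk
      set f : Char → Bool := fun d => PySem.Chars.isalnum d == k with hf
      have hsplit : cs = cs.takeWhile f ++ cs.dropWhile f := (List.takeWhile_append_dropWhile).symm
      have hrun : ∀ d ∈ cs.takeWhile f, PySem.Chars.isalnum d = k := by
        intro d hd
        have := List.mem_takeWhile_imp hd
        simpa [hf] using this
      have hrest : (cs.dropWhile f).length ≤ n := by
        have := List.length_dropWhile_le (p := f) (l := cs)
        simp at hl; omega
      have hIH := ih (cs.dropWhile f) hrest
      rw [pvBGroups]
      simp only [List.map_cons, List.flatten_cons, ← hf, ← hk]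
      cases hkk : k with
      | true =>
        have h1 : pvALoop (c :: cs) false = c :: pvALoop cs false := by
          simp [pvALoop, hkk ▸ hk.symm]
        rw [h1, hsplit, pvALoop_alnum_run _ _ (fun d hd => by rw [hrun d hd, hkk]), hIH]
        simp
      | false =>
        have h1 : pvALoop (c :: cs) false = '_' :: pvALoop cs true := by
          simp [pvALoop, hkk ▸ hk.symm]
        rw [h1, hsplit, pvALoop_nonalnum_run _ _ (fun d hd => by rw [hrun d hd, hkk])]
        rw [pvALoop_true_eq_false _ ?_, hIH]
        · simp
        · intro d l' hd
          have := pvDropWhile_head f cs d l' hd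
          simp [hf, hkk] at this
          exact this

theorem pvCore (l : List Char) :
    pvALoop l false = ((pvBGroups l).map (fun g => if g.1 then g.2 else ['_'])).flatten :=
  pvMain l.length l le_rfl

-- ===== VERDICT (by name: the statement is the Claim_ definition above) =====
theorem normalise_sector_name_py_spec : Claim_equal_normalise_sector_name_py := by
  intro sector _
  unfold Spec_normalise_sector_name_py normalise_sector_name_py normalise_sector_name_py_alt
  by_cases h : sector = "" <;> simp [h, pvCore]
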